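-- pv_equiv track=rewrite | github.com/microsoft/nni | examples/nas/textnas/dataloader.py | sst_get_id_input
-- ===== SOURCE A (Python) =====
-- def sst_get_id_input(content, word_id_dict, max_input_length):
--     words = content.split(" ")
--     sentence = [word_id_dict["<pad>"]] * max_input_length
--     mask = [0] * max_input_length
--     unknown = word_id_dict["<unknown>"]
--     for i, word in enumerate(words[:max_input_length]):
--         sentence[i] = word_id_dict.get(word, unknown)
--         mask[i] = 1
--     return sentence, mask
-- ===== SOURCE B (Python) =====
-- def sst_get_id_input(content, word_id_dict, max_input_length):
--     unknown = word_id_dict["<unknown>"]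
--     pad = word_id_dict["<pad>"]
--     it = iter(content.split(" "))
--     sentence = []
--     mask = []
--     for _ in range(max_input_length):
--         w = next(it, None)
--         if w is None:
--             sentence.append(pad)
--             mask.append(0)
--         else:
--             sentence.append(word_id_dict.get(w, unknown))
--             mask.append(1)
--     return sentence, mask
-- ===== Notes on version B (the rewrite author's own statement) =====
-- stated objective: alternative
-- what changed: B makes one fused pass over the output positions, consuming the word stream with next() and branching per position between word-id/1 and pad/0, instead of A's preallocated full-size buffers whose prefix is overwritten by index over a slice of the words.
import Mathlib
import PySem

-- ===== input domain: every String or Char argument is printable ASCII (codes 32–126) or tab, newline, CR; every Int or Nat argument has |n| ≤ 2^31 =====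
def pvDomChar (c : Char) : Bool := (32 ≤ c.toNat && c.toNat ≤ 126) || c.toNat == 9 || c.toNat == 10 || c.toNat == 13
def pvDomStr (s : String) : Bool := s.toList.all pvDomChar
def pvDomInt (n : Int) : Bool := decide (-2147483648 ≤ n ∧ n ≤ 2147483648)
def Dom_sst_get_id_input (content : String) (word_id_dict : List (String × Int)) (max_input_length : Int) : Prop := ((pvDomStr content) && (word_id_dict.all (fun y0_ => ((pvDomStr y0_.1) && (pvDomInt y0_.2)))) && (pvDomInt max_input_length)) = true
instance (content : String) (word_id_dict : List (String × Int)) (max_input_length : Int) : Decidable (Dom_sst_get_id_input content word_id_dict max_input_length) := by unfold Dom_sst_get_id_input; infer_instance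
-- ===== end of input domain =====

-- B makes one fused pass over the output positions, consuming the word stream with a
-- per-position branch, instead of A's preallocate-and-overwrite-by-index; return values
-- are proved equal on Pre_.

-- ===== PORT A =====
-- the `for i, word in enumerate(words[:max_input_length])` loop: index counter + in-place set
def sstLoopA (d : List (String × Int)) (unk : Int) :
    List String → Nat → List Int → List Int → List Int × List Int
  | [], _, s, mk => (s, mk)
  | w :: ws, i, s, mk =>
      sstLoopA d unk ws (i + 1) (s.set i ((List.lookup w d).getD unk)) (mk.set i 1)

def sst_get_id_input (content : String) (word_id_dict : List (String × Int)) (max_input_length : Int) : List Int × List Int :=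
  let words := (PySem.Str.split? content " ").getD []   -- content.split(" "); sep ≠ "" so split? is some
  let sentence := List.replicate max_input_length.toNat ((List.lookup "<pad>" word_id_dict).getD 0)
  let mask : List Int := List.replicate max_input_length.toNat 0
  let unknown := (List.lookup "<unknown>" word_id_dict).getD 0
  sstLoopA word_id_dict unknown (PySem.List.slice words none (some max_input_length)) 0 sentence mask

-- ===== PORT B =====
-- `for _ in range(max_input_length): w = next(it, None); …` — one pass over positions,
-- consuming the remaining word stream; range(m) is empty for m ≤ 0, hence fuel m.toNat.
def sstLoopB (d : List (String × Int)) (unk pad : Int) :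
    Nat → List String → List Int × List Int
  | 0, _ => ([], [])
  | n + 1, [] =>
      let r := sstLoopB d unk pad n []
      (pad :: r.1, 0 :: r.2)
  | n + 1, w :: ws =>
      let r := sstLoopB d unk pad n ws
      ((List.lookup w d).getD unk :: r.1, 1 :: r.2)

def sst_get_id_input_alt (content : String) (word_id_dict : List (String × Int)) (max_input_length : Int) : List Int × List Int :=
  let unknown := (List.lookup "<unknown>" word_id_dict).getD 0
  let pad := (List.lookup "<pad>" word_id_dict).getD 0
  sstLoopB word_id_dict unknown pad max_input_length.toNat ((PySem.Str.split? content " ").getD [])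

-- ===== PRECONDITION & SPEC =====
-- Pre_ excludes exactly the inputs where Python A raises: a missing "<pad>"/"<unknown>" key
-- (KeyError), and a negative max_input_length with more than |max_input_length| words, where
-- the indexed assignment runs past the empty preallocated lists (IndexError).
def Pre_sst_get_id_input (content : String) (word_id_dict : List (String × Int)) (max_input_length : Int) : Prop :=
  "<pad>" ∈ word_id_dict.map Prod.fst ∧ "<unknown>" ∈ word_id_dict.map Prod.fst ∧
    (0 ≤ max_input_length ∨ ((PySem.Str.split? content " ").getD []).length ≤ (-max_input_length).toNat)
instance (content : String) (word_id_dict : List (String × Int)) (max_input_length : Int) : Decidable (Pre_sst_get_id_input content word_id_dict max_input_length) := by unfold Pre_sst_get_id_input; infer_instance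

def pvWitness_sst_get_id_input : String × (List (String × Int)) × Int :=
  ("a b", [("<pad>", 0), ("<unknown>", 1), ("a", 5)], 3)

def Spec_sst_get_id_input (content : String) (word_id_dict : List (String × Int)) (max_input_length : Int) (out : List Int × List Int) : Prop := out = sst_get_id_input_alt content word_id_dict max_input_length
instance (content : String) (word_id_dict : List (String × Int)) (max_input_length : Int) (out : List Int × List Int) : Decidable (Spec_sst_get_id_input content word_id_dict max_input_length out) := by unfold Spec_sst_get_id_input; infer_instance

-- ===== CLAIM (what is proved, stated in full; the proofs are below) =====
def Claim_equal_sst_get_id_input : Prop := ∀ (content : String) (word_id_dict : List (String × Int)) (max_input_length : Int), Dom_sst_get_id_input content word_id_dict max_input_length → Pre_sst_get_id_input content word_id_dict max_input_length → Spec_sst_get_id_input content word_id_dict max_input_length (sst_get_id_input content word_id_dict max_input_length)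

-- ===== LEMMAS AND PROOFS =====

lemma take_succ_set (s : List Int) (i : Nat) (v : Int) (h : i < s.length) :
    (s.set i v).take (i + 1) = s.take i ++ [v] := by
  rw [List.set_eq_take_append_cons_drop, if_pos h, List.take_append]
  simp [List.length_take, Nat.min_eq_left h.le, List.take_take]

lemma sstLoopA_spec (d : List (String × Int)) (unk : Int) (ws : List String) :
    ∀ (i : Nat) (s mk : List Int), i + ws.length ≤ s.length → i + ws.length ≤ mk.length →
    sstLoopA d unk ws i s mk =
      (s.take i ++ ws.map (fun w => (List.lookup w d).getD unk) ++ s.drop (i + ws.length),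
       mk.take i ++ List.replicate ws.length (1 : Int) ++ mk.drop (i + ws.length)) := by
  induction ws with
  | nil => intro i s mk hs hmk; simp [sstLoopA]
  | cons w ws ih =>
    intro i s mk hs hmk
    simp only [List.length_cons] at hs hmk
    have hi : i < s.length := by omega
    have hi' : i < mk.length := by omega
    rw [sstLoopA, ih (i + 1) _ _ (by simp; omega) (by simp; omega)]
    rw [List.drop_set_of_lt (by omega), List.drop_set_of_lt (by omega),
        take_succ_set _ _ _ hi, take_succ_set _ _ _ hi']
    simp [List.replicate_succ]
    omega

lemma sstLoopB_spec (d : List (String × Int)) (unk pad : Int) :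
    ∀ (n : Nat) (ws : List String),
    sstLoopB d unk pad n ws =
      ((ws.take n).map (fun w => (List.lookup w d).getD unk) ++ List.replicate (n - ws.length) pad,
       List.replicate (min n ws.length) (1 : Int) ++ List.replicate (n - ws.length) (0 : Int)) := by
  intro n
  induction n with
  | zero => intro ws; simp [sstLoopB]
  | succ n ih =>
    intro ws
    cases ws with
    | nil => simp [sstLoopB, ih, List.replicate_succ]
    | cons w ws =>
      simp only [sstLoopB, ih ws, List.take_succ_cons, List.map_cons, List.length_cons]
      have h1 : n + 1 - (ws.length + 1) = n - ws.length := by omega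
      have h2 : min (n + 1) (ws.length + 1) = min n ws.length + 1 := by omega
      simp [h1, h2, List.replicate_succ]

-- ===== VERDICT (by name: the statement is the Claim_ definition above) =====
theorem sst_get_id_input_spec : Claim_equal_sst_get_id_input := by
  intro content d m _ hpre
  obtain ⟨-, -, hm⟩ := hpre
  unfold Spec_sst_get_id_input sst_get_id_input sst_get_id_input_alt
  simp only []
  set words : List String := (PySem.Str.split? content " ").getD [] with hwords
  rw [sstLoopB_spec]
  by_cases h0 : 0 ≤ m
  · rw [PySem.List.slice_to words h0]
    rw [sstLoopA_spec _ _ _ 0 _ _ (by simp) (by simp)]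
    simp only [List.take_zero, Nat.zero_add, List.nil_append, List.drop_replicate,
      List.length_take]
    have heq : m.toNat - min m.toNat words.length = m.toNat - words.length := by omega
    rw [heq]
  · have h0' : m < 0 := by omega
    have hk : 0 < (-m).toNat := by omega
    have hm' : m = -(((-m).toNat : Nat) : Int) := by omega
    have hshort : words.length ≤ (-m).toNat := by
      rcases hm with h | h
      · omega
      · exact h
    rw [hm', PySem.List.slice_to_neg_natCast words _ hk]
    have h1 : words.length - (-m).toNat = 0 := by omega
    have hz : (-(((-m).toNat : Nat) : Int)).toNat = 0 := by omega
    rw [h1, List.take_zero, hz]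
    simp [sstLoopA]
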